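-- pv_equiv track=rewrite | github.com/iceice666/dotfiles | hosts/server/configuration/services/daily-audit/pipeline.py | section_code_blocks
-- ===== SOURCE A (Python) =====
-- def section_code_blocks(markdown: str) -> dict[str, list[str]]:
--     sections: dict[str, list[str]] = {}
--     current_heading: str | None = None
--     buffer: list[str] = []
--     in_code = False
--
--     for line in markdown.splitlines():
--         if line.startswith("## "):
--             if current_heading is not None:
--                 sections[current_heading] = buffer[:]
--             current_heading = line[3:].strip()
--             buffer = []
--             in_code = False
--             continue
--
--         if line.startswith("```") and current_heading is not None:
--             in_code = not in_code
--             continue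
--
--         if current_heading is not None and in_code:
--             buffer.append(line)
--
--     if current_heading is not None:
--         sections[current_heading] = buffer[:]
--
--     return sections
-- ===== SOURCE B (Python) =====
-- def section_code_blocks(markdown: str) -> dict[str, list[str]]:
--     # pass 1: group raw lines under their headings (pre-heading lines dropped)
--     done: list[tuple[str, list[str]]] = []
--     current: tuple[str, list[str]] | None = None
--     for line in markdown.splitlines():
--         if line.startswith("## "):
--             if current is not None:
--                 done.append(current)
--             current = (line[3:].strip(), [])
--         elif current is not None:
--             current[1].append(line)
--     if current is not None:
--         done.append(current)
--
--     # pass 2: per section, extract the lines inside code fences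
--     result: dict[str, list[str]] = {}
--     for heading, raw in done:
--         in_code = False
--         code: list[str] = []
--         for ln in raw:
--             if ln.startswith("```"):
--                 in_code = not in_code
--             elif in_code:
--                 code.append(ln)
--         result[heading] = code
--     return result
-- ===== Notes on version B (the rewrite author's own statement) =====
-- stated objective: alternative
-- what changed: Two-pass decomposition: first group raw lines per markdown heading into an ordered section list, then a separate per-section fence-toggle pass extracts code lines and builds the dict, instead of A's single loop interleaving dict writes, fence state and buffering.
import Mathlib
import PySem

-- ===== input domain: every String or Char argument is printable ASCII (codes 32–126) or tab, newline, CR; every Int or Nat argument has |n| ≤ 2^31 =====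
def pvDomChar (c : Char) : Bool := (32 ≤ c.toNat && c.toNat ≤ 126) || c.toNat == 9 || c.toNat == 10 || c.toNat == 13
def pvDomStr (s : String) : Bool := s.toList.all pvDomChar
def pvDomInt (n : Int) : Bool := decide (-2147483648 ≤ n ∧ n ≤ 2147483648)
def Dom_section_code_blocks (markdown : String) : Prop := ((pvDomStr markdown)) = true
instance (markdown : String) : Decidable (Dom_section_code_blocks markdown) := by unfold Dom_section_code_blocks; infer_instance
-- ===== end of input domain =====

-- B is an alternative decomposition of A (same cost): group lines per heading first, then extract fenced lines per section.

-- ===== PORT A =====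
-- A's single loop: state = (sections dict, current heading, buffer, in_code)
def pvLoopA : List String → PySem.Dict String (List String) → Option String →
    List String → Bool → PySem.Dict String (List String)
  | [], sections, cur, buf, _ =>
      match cur with
      | some h => sections.insert h buf
      | none => sections
  | line :: rest, sections, cur, buf, ic =>
      if PySem.Str.startswith line "## " then
        pvLoopA rest
          (match cur with
           | some h => sections.insert h buf
           | none => sections)
          (some (PySem.Str.strip (PySem.Str.slice line (some 3) none))) [] false
      else if PySem.Str.startswith line "```" && cur.isSome then
        pvLoopA rest sections cur buf (!ic)
      else if cur.isSome && ic then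
        pvLoopA rest sections cur (buf ++ [line]) ic
      else
        pvLoopA rest sections cur buf ic

def section_code_blocks (markdown : String) : List (String × List String) :=
  (pvLoopA (PySem.Str.splitlines markdown) PySem.Dict.empty none [] false).items

-- ===== PORT B =====
-- pass 1: group raw lines under their headings (pre-heading lines dropped)
def pvGroup : List String → List (String × List String) → Option (String × List String) →
    List (String × List String)
  | [], done, cur =>
      match cur with
      | some c => done ++ [c]
      | none => done
  | line :: rest, done, cur =>
      if PySem.Str.startswith line "## " then
        pvGroup rest
          (match cur with
           | some c => done ++ [c]
           | none => done)
          (some (PySem.Str.strip (PySem.Str.slice line (some 3) none), []))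
      else
        match cur with
        | some (h, raw) => pvGroup rest done (some (h, raw ++ [line]))
        | none => pvGroup rest done none

-- pass 2 inner loop: extract the lines inside code fences of one section
def pvExtract : List String → Bool → List String → List String
  | [], _, code => code
  | ln :: rest, inCode, code =>
      if PySem.Str.startswith ln "```" then pvExtract rest (!inCode) code
      else if inCode then pvExtract rest inCode (code ++ [ln])
      else pvExtract rest inCode code

-- pass 2 outer loop: build the result dict
def pvBuild : List (String × List String) → PySem.Dict String (List String) →
    PySem.Dict String (List String)
  | [], d => d
  | (h, raw) :: rest, d => pvBuild rest (d.insert h (pvExtract raw false []))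

def section_code_blocks_alt (markdown : String) : List (String × List String) :=
  (pvBuild (pvGroup (PySem.Str.splitlines markdown) [] none) PySem.Dict.empty).items

-- ===== PRECONDITION & SPEC =====
def Spec_section_code_blocks (markdown : String) (out : List (String × List String)) : Prop := out = section_code_blocks_alt markdown
instance (markdown : String) (out : List (String × List String)) : Decidable (Spec_section_code_blocks markdown out) := by unfold Spec_section_code_blocks; infer_instance

-- ===== CLAIM (what is proved, stated in full; the proofs are below) =====
def Claim_equal_section_code_blocks : Prop := ∀ (markdown : String), Dom_section_code_blocks markdown → Spec_section_code_blocks markdown (section_code_blocks markdown)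

-- ===== LEMMAS AND PROOFS =====

-- fence-machine state after one section's raw lines: (in_code, buffer)
def pvStateE : List String → Bool × List String → Bool × List String
  | [], s => s
  | ln :: rest, s =>
      if PySem.Str.startswith ln "```" then pvStateE rest (!s.1, s.2)
      else if s.1 then pvStateE rest (s.1, s.2 ++ [ln])
      else pvStateE rest s

theorem pvExtract_eq_stateE (xs : List String) (ic : Bool) (code : List String) :
    pvExtract xs ic code = (pvStateE xs (ic, code)).2 := by
  induction xs generalizing ic code with
  | nil => rfl
  | cons ln rest ih =>
      simp only [pvExtract, pvStateE]
      split_ifs <;> simp only [ih]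

theorem pvStateE_append (xs ys : List String) (s : Bool × List String) :
    pvStateE (xs ++ ys) s = pvStateE ys (pvStateE xs s) := by
  induction xs generalizing s with
  | nil => rfl
  | cons ln rest ih =>
      simp only [List.cons_append, pvStateE]
      split_ifs <;> simp [ih]

theorem pvGroup_acc (ls : List String) (done : List (String × List String))
    (cur : Option (String × List String)) :
    pvGroup ls done cur = done ++ pvGroup ls [] cur := by
  induction ls generalizing done cur with
  | nil => cases cur <;> simp [pvGroup]
  | cons line rest ih =>
      cases cur with
      | none =>
          simp only [pvGroup]
          split_ifs with h
          · rw [ih, ih []]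
          · exact ih done none
      | some c =>
          obtain ⟨hd, raw⟩ := c
          simp only [pvGroup]
          split_ifs with h
          · rw [ih, ih ([] ++ [(hd, raw)])]; rw [List.nil_append, List.append_assoc]
          · rw [ih, ih []]

theorem pvBuild_append (xs ys : List (String × List String))
    (d : PySem.Dict String (List String)) :
    pvBuild (xs ++ ys) d = pvBuild ys (pvBuild xs d) := by
  induction xs generalizing d with
  | nil => rfl
  | cons p rest ih => obtain ⟨h, raw⟩ := p; simp [pvBuild, ih]

-- main invariant: A's loop from an open section (h, raw) equals B's grouping + building
theorem pvMain (ls : List String) (sections : PySem.Dict String (List String))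
    (h : String) (raw : List String) :
    pvLoopA ls sections (some h) (pvStateE raw (false, [])).2 (pvStateE raw (false, [])).1
      = pvBuild (pvGroup ls [] (some (h, raw))) sections := by
  induction ls generalizing sections h raw with
  | nil =>
      simp [pvLoopA, pvGroup, pvBuild, pvExtract_eq_stateE]
  | cons line rest ih =>
      simp only [pvLoopA, pvGroup]
      split_ifs with h1 h2 h3
      · -- new heading
        rw [pvGroup_acc, pvBuild_append]
        have := ih (sections.insert h (pvStateE raw (false, [])).2)
          (PySem.Str.strip (PySem.Str.slice line (some 3) none)) []
        simpa [pvBuild, pvExtract_eq_stateE, pvStateE] using this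
      · -- fence toggle
        simp only [Option.isSome_some, Bool.and_true] at h2
        simp at h2
        have hs : pvStateE (raw ++ [line]) (false, []) =
            (!(pvStateE raw (false, [])).1, (pvStateE raw (false, [])).2) := by
          rw [pvStateE_append]
          simp [pvStateE, h2]
        have := ih sections h (raw ++ [line])
        rw [hs] at this
        simpa using this
      · -- in-code line collected
        simp only [Option.isSome_some, Bool.and_true] at h2
        simp at h2
        simp at h3
        have hs : pvStateE (raw ++ [line]) (false, []) =
            ((pvStateE raw (false, [])).1, (pvStateE raw (false, [])).2 ++ [line]) := by
          rw [pvStateE_append]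
          simp [pvStateE, h2, h3]
        have := ih sections h (raw ++ [line])
        rw [hs] at this
        simpa using this
      · -- plain line outside code
        simp only [Option.isSome_some, Bool.and_true] at h2
        simp at h2
        simp at h3
        have hs : pvStateE (raw ++ [line]) (false, []) = pvStateE raw (false, []) := by
          rw [pvStateE_append]
          simp [pvStateE, h2, h3]
        have := ih sections h (raw ++ [line])
        rw [hs] at this
        simpa using this

-- pre-heading phase: nothing accumulates until the first "## " line
theorem pvPre (ls : List String) (d : PySem.Dict String (List String)) :
    pvLoopA ls d none [] false = pvBuild (pvGroup ls [] none) d := by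
  induction ls generalizing d with
  | nil => rfl
  | cons line rest ih =>
      simp only [pvLoopA, pvGroup, Option.isSome_none, Bool.and_false,
        Bool.false_eq_true, if_false]
      split_ifs with h1
      · have := pvMain rest d (PySem.Str.strip (PySem.Str.slice line (some 3) none)) []
        simpa [pvStateE] using this
      · exact ih d

-- ===== VERDICT (by name: the statement is the Claim_ definition above) =====
theorem section_code_blocks_spec : Claim_equal_section_code_blocks := by
  intro markdown _
  unfold Spec_section_code_blocks section_code_blocks section_code_blocks_alt
  rw [pvPre]
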